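-- pv_equiv track=rewrite | github.com/MeetKai/functionary | functionary/train/metrics.py | extract_unmasked_chunks
-- ===== SOURCE A (Python) =====
-- from typing import Any, List, Dict, Tuple
--
-- def extract_unmasked_chunks(labels: List[int], preds: List[int]):
--     """labels = [-100, -100, ... id1, id2, ...-100, -100, ...]
--     this function extract unmasked chunks: [[id1, id2, ...], ...] in both labels and preds
--
--     Args:
--         labels (List[int]): _description_
--         preds (List[int]): _description_
--
--     Returns:
--         _type_: _description_
--     """
--     current_label_chunk = []
--     current_pred_chunk = []
--     result = []
--     for i in range(len(labels)):
--         if labels[i] != -100: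
--             current_label_chunk.append(labels[i])
--             current_pred_chunk.append(preds[i])
--         else:
--             if len(current_label_chunk) > 0:  # end of the assistant response chunk
--                 result.append((current_label_chunk, current_pred_chunk))
--                 current_label_chunk = []
--                 current_pred_chunk = []
--
--     if len(current_label_chunk) > 0:
--         result.append((current_label_chunk, current_pred_chunk))
--     return result
-- ===== SOURCE B (Python) =====
-- def extract_unmasked_chunks(labels, preds):
--     result = []
--     n = len(labels)
--     i = 0
--     while i < n:
--         if labels[i] == -100:
--             i += 1
--         else:
--             j = i
--             while j < n and labels[j] != -100:
--                 j += 1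
--             result.append((labels[i:j], preds[i:j]))
--             i = j
--     return result
-- ===== Notes on version B (the rewrite author's own statement) =====
-- stated objective: alternative
-- what changed: Replaced the element-by-element state machine with accumulator chunks and a trailing flush by a two-pointer scan that finds each unmasked run's end and appends whole slices labels[i:j], preds[i:j].
import Mathlib
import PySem

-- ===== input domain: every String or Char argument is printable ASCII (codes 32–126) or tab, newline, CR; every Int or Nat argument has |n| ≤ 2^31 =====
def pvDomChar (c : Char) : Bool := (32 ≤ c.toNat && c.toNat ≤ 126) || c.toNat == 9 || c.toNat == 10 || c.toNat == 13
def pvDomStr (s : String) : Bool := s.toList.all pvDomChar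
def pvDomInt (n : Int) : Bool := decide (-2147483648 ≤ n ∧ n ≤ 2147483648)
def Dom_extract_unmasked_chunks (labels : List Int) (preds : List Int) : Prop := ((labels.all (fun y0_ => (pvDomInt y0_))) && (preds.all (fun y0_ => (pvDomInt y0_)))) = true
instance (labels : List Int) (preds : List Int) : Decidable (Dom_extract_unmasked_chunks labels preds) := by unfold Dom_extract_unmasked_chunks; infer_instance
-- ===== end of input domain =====

-- Alternative re-implementation: B replaces A's element-by-element state machine (chunk
-- accumulators + trailing flush) with a two-pointer scan appending whole slices labels[i:j], preds[i:j].

-- ===== PORT A =====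
-- one loop iteration of A: state = (current_label_chunk, current_pred_chunk, result)
def pvStepA (labels preds : List Int)
    (s : List Int × List Int × List (List Int × List Int)) (i : Int) :
    List Int × List Int × List (List Int × List Int) :=
  if PySem.List.pyGetD labels i 0 ≠ -100 then
    (s.1 ++ [PySem.List.pyGetD labels i 0], s.2.1 ++ [PySem.List.pyGetD preds i 0], s.2.2)
  else
    if s.1.length > 0 then ([], [], s.2.2 ++ [(s.1, s.2.1)]) else s

def extract_unmasked_chunks (labels : List Int) (preds : List Int) : List (List Int × List Int) :=
  let s := (PySem.List.pyRange 0 labels.length 1).foldl (pvStepA labels preds) ([], [], [])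
  if s.1.length > 0 then s.2.2 ++ [(s.1, s.2.1)] else s.2.2

-- ===== PORT B =====
-- inner while loop: advance j while j < n and labels[j] != -100
def pvFindEnd (labels : List Int) (n j : Nat) : Nat :=
  if h : j < n ∧ labels.getD j 0 ≠ -100 then pvFindEnd labels n (j + 1) else j
termination_by n - j
decreasing_by omega

theorem pvFindEnd_ge (labels : List Int) (n j : Nat) : j ≤ pvFindEnd labels n j := by
  unfold pvFindEnd
  split
  · exact le_trans (Nat.le_succ j) (pvFindEnd_ge labels n (j + 1))
  · exact le_refl j
termination_by n - j
decreasing_by rename_i h; omega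

-- outer while loop of B
def pvGoB (labels preds : List Int) (n i : Nat) : List (List Int × List Int) :=
  if h : i < n then
    if hm : labels.getD i 0 = -100 then pvGoB labels preds n (i + 1)
    else
      let j := pvFindEnd labels n i
      (PySem.List.slice labels (some (i : Int)) (some (j : Int)),
       PySem.List.slice preds (some (i : Int)) (some (j : Int))) :: pvGoB labels preds n j
  else []
termination_by n - i
decreasing_by
  · omega
  · have h1 : i + 1 ≤ pvFindEnd labels n (i + 1) := pvFindEnd_ge labels n (i + 1)
    have h2 : pvFindEnd labels n i = pvFindEnd labels n (i + 1) := by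
      rw [pvFindEnd]; simp_all
    omega

def extract_unmasked_chunks_alt (labels : List Int) (preds : List Int) : List (List Int × List Int) :=
  pvGoB labels preds labels.length 0

-- ===== PRECONDITION & SPEC =====
-- Pre_ excludes exactly the inputs on which A raises IndexError: an unmasked position
-- of labels whose index is out of range for preds (A reads preds[i] there).
def Pre_extract_unmasked_chunks (labels : List Int) (preds : List Int) : Prop :=
  ∀ i ∈ List.range labels.length, labels.getD i 0 ≠ -100 → i < preds.length
instance (labels : List Int) (preds : List Int) : Decidable (Pre_extract_unmasked_chunks labels preds) := by
  unfold Pre_extract_unmasked_chunks; infer_instance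

def pvWitness_extract_unmasked_chunks : List Int × List Int :=
  ([-100, 1, 2, -100, 3], [9, 5, 6, 9, 7])

def Spec_extract_unmasked_chunks (labels : List Int) (preds : List Int) (out : List (List Int × List Int)) : Prop := out = extract_unmasked_chunks_alt labels preds
instance (labels : List Int) (preds : List Int) (out : List (List Int × List Int)) : Decidable (Spec_extract_unmasked_chunks labels preds out) := by unfold Spec_extract_unmasked_chunks; infer_instance

-- ===== CLAIM (what is proved, stated in full; the proofs are below) =====
def Claim_equal_extract_unmasked_chunks : Prop := ∀ (labels : List Int) (preds : List Int), Dom_extract_unmasked_chunks labels preds → Pre_extract_unmasked_chunks labels preds → Spec_extract_unmasked_chunks labels preds (extract_unmasked_chunks labels preds)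

-- ===== LEMMAS AND PROOFS =====

-- A's trailing flush, as a function of the loop state (proof-side helper)
def pvFlushA (s : List Int × List Int × List (List Int × List Int)) : List (List Int × List Int) :=
  if s.1.length > 0 then s.2.2 ++ [(s.1, s.2.1)] else s.2.2

theorem pvFindEnd_stop (labels : List Int) (n j : Nat)
    (h : ¬ (j < n ∧ labels.getD j 0 ≠ -100)) : pvFindEnd labels n j = j := by
  rw [pvFindEnd]; simp_all

theorem pvFindEnd_step (labels : List Int) (n j : Nat)
    (h1 : j < n) (h2 : labels.getD j 0 ≠ -100) :
    pvFindEnd labels n j = pvFindEnd labels n (j + 1) := by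
  rw [pvFindEnd]; simp_all

theorem pv_slice_cons (xs : List Int) (i j : Nat) (hij : i < j) (hi : i < xs.length) :
    PySem.List.slice xs (some (i : Int)) (some (j : Int))
      = xs[i] :: PySem.List.slice xs (some ((i + 1 : Nat) : Int)) (some (j : Int)) := by
  rw [PySem.List.slice_natCast, PySem.List.slice_natCast]
  rw [List.drop_eq_getElem_cons hi]
  have : j - i = (j - (i + 1)) + 1 := by omega
  rw [this, List.take_succ_cons]

theorem pv_slice_empty (xs : List Int) (i : Nat) :
    PySem.List.slice xs (some (i : Int)) (some (i : Int)) = [] := by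
  rw [PySem.List.slice_natCast]; simp

-- main loop correspondence, both shapes at once, by induction on the remaining length
theorem pv_main (labels preds : List Int) (hpre : Pre_extract_unmasked_chunks labels preds)
    (k : Nat) : ∀ i, labels.length - i = k → i ≤ labels.length →
    (∀ res, pvFlushA (((PySem.List.pyRange (i : Int) (labels.length : Int) 1)).foldl
        (pvStepA labels preds) ([], [], res))
      = res ++ pvGoB labels preds labels.length i) ∧
    (∀ cl cp res, cl ≠ [] →
      pvFlushA (((PySem.List.pyRange (i : Int) (labels.length : Int) 1)).foldl
        (pvStepA labels preds) (cl, cp, res))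
      = res ++ (cl ++ PySem.List.slice labels (some (i : Int)) (some ((pvFindEnd labels labels.length i : Nat) : Int)),
                cp ++ PySem.List.slice preds (some (i : Int)) (some ((pvFindEnd labels labels.length i : Nat) : Int)))
            :: pvGoB labels preds labels.length (pvFindEnd labels labels.length i)) := by
  induction k with
  | zero =>
    intro i hk hi
    have hin : i = labels.length := by omega
    have hrange : PySem.List.pyRange (i : Int) (labels.length : Int) 1 = [] := by
      rw [hin]; simp
    have hfe : pvFindEnd labels labels.length i = i :=
      pvFindEnd_stop labels labels.length i (by rw [hin]; simp)
    have hgo : pvGoB labels preds labels.length i = [] := by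
      rw [pvGoB, dif_neg (by omega)]
    refine ⟨?_, ?_⟩
    · intro res; rw [hrange]; simp [List.foldl, pvFlushA, hgo]
    · intro cl cp res hcl
      rw [hrange]
      simp [List.foldl, pvFlushA, hcl, List.length_pos_iff, hfe, hgo, pv_slice_empty]
  | succ k ih =>
    intro i hk hi
    have hin : i < labels.length := by omega
    have hrange : PySem.List.pyRange (i : Int) (labels.length : Int) 1
        = (i : Int) :: PySem.List.pyRange ((i + 1 : Nat) : Int) (labels.length : Int) 1 := by
      rw [PySem.List.pyRange_one_cons (by exact_mod_cast hin)]
      norm_num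
    have ih' := ih (i + 1) (by omega) (by omega)
    by_cases hm : labels.getD i 0 = -100
    · -- masked position
      have hm' : labels[i]?.getD 0 = -100 := by rw [← List.getD_eq_getElem?_getD]; exact hm
      have hstep : ∀ s : List Int × List Int × List (List Int × List Int),
          pvStepA labels preds s (i : Int)
          = if s.1.length > 0 then ([], [], s.2.2 ++ [(s.1, s.2.1)]) else s := by
        intro s
        simp only [pvStepA, PySem.List.pyGetD_natCast]
        rw [if_neg (by simp [hm'])]
      have hgo : pvGoB labels preds labels.length i
          = pvGoB labels preds labels.length (i + 1) := by
        rw [pvGoB, dif_pos hin, dif_pos hm]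
      have hfe : pvFindEnd labels labels.length i = i :=
        pvFindEnd_stop labels labels.length i (by simp [hm'])
      refine ⟨?_, ?_⟩
      · intro res
        rw [hrange, List.foldl_cons, hstep]
        simp only [List.length_nil, gt_iff_lt, Nat.lt_irrefl, if_false]
        rw [ih'.1 res, hgo]
      · intro cl cp res hcl
        rw [hrange, List.foldl_cons, hstep]
        rw [if_pos (by simpa [List.length_pos_iff] using hcl)]
        rw [ih'.1 (res ++ [(cl, cp)]), hfe, pv_slice_empty, pv_slice_empty]
        rw [hgo]
        simp
    · -- unmasked position
      have hip : i < preds.length := hpre i (List.mem_range.mpr hin) hm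
      have hstep : ∀ s : List Int × List Int × List (List Int × List Int),
          pvStepA labels preds s (i : Int)
          = (s.1 ++ [labels.getD i 0], s.2.1 ++ [preds.getD i 0], s.2.2) := by
        intro s
        simp only [pvStepA, PySem.List.pyGetD_natCast]
        rw [if_pos hm]
      have hfe : pvFindEnd labels labels.length i = pvFindEnd labels labels.length (i + 1) :=
        pvFindEnd_step labels labels.length i hin hm
      have hfe1 : i + 1 ≤ pvFindEnd labels labels.length (i + 1) := pvFindEnd_ge _ _ _
      have hLi : labels.getD i 0 = labels[i] := List.getD_eq_getElem labels 0 hin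
      have hPi : preds.getD i 0 = preds[i] := List.getD_eq_getElem preds 0 hip
      have hlc : PySem.List.slice labels (some (i : Int))
            (some ((pvFindEnd labels labels.length i : Nat) : Int))
          = labels.getD i 0 :: PySem.List.slice labels (some ((i + 1 : Nat) : Int))
            (some ((pvFindEnd labels labels.length (i + 1) : Nat) : Int)) := by
        rw [hfe, hLi]; exact pv_slice_cons labels i _ (by omega) hin
      have hpc : PySem.List.slice preds (some (i : Int))
            (some ((pvFindEnd labels labels.length i : Nat) : Int))
          = preds.getD i 0 :: PySem.List.slice preds (some ((i + 1 : Nat) : Int))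
            (some ((pvFindEnd labels labels.length (i + 1) : Nat) : Int)) := by
        rw [hfe, hPi]; exact pv_slice_cons preds i _ (by omega) hip
      have hgo : pvGoB labels preds labels.length i
          = (PySem.List.slice labels (some (i : Int))
               (some ((pvFindEnd labels labels.length i : Nat) : Int)),
             PySem.List.slice preds (some (i : Int))
               (some ((pvFindEnd labels labels.length i : Nat) : Int)))
            :: pvGoB labels preds labels.length (pvFindEnd labels labels.length i) := by
        rw [pvGoB, dif_pos hin, dif_neg hm]
      refine ⟨?_, ?_⟩
      · intro res
        rw [hrange, List.foldl_cons, hstep]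
        dsimp only
        rw [ih'.2 ([] ++ [labels.getD i 0]) ([] ++ [preds.getD i 0]) res (by simp), List.nil_append, List.nil_append]
        rw [hgo, hlc, hpc, hfe]
        simp
      · intro cl cp res hcl
        rw [hrange, List.foldl_cons, hstep]
        dsimp only
        rw [ih'.2 (cl ++ [labels.getD i 0]) (cp ++ [preds.getD i 0]) res (by simp)]
        rw [hlc, hpc, hfe]
        simp

-- ===== VERDICT (by name: the statement is the Claim_ definition above) =====
theorem extract_unmasked_chunks_spec : Claim_equal_extract_unmasked_chunks := by
  intro labels preds _ hpre
  unfold Spec_extract_unmasked_chunks extract_unmasked_chunks extract_unmasked_chunks_alt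
  have h := (pv_main labels preds hpre (labels.length) 0 (by omega) (by omega)).1 []
  simpa [pvFlushA, PySem.List.pyRange_zero_natCast] using h
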